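-- pv_equiv track=rewrite | github.com/jguecaimburu/euler | ex49e.py | get_consecutive_pairs
-- ===== SOURCE A (Python) =====
-- def get_consecutive_pairs(equidistance_list):
--     consecutive_pairs = {}
--     last_was_consecutive = False
--     for index, tuple in enumerate(equidistance_list[:-1]):
--         if tuple[1] == equidistance_list[index+1][0]:
--             if not last_was_consecutive:
--                 last_was_consecutive = True
--                 first_tuple_in_seq = tuple
--                 accum_tuple = tuple + equidistance_list[index+1]
--             else:
--                 accum_tuple += equidistance_list[index+1]
--             if index == len(equidistance_list) - 2:
--                 consecutive_pairs[first_tuple_in_seq] = accum_tuple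
--         else:
--             if last_was_consecutive:
--                 last_was_consecutive = False
--                 consecutive_pairs[first_tuple_in_seq] = accum_tuple
--     return consecutive_pairs
-- ===== SOURCE B (Python) =====
-- def get_consecutive_pairs(equidistance_list):
--     # Run-based scan: find each maximal chain of linked tuples, then emit
--     # its flattened concatenation in one shot.
--     result = {}
--     rest = equidistance_list
--     while len(rest) >= 2:
--         run = 1
--         while run < len(rest) and rest[run - 1][1] == rest[run][0]:
--             run += 1
--         if run > 1:
--             result[rest[0]] = tuple(x for t in rest[:run] for x in t)
--         rest = rest[run:]
--     return result
-- ===== Notes on version B (the rewrite author's own statement) =====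
-- stated objective: alternative
-- what changed: Replaces A's streaming one-pass state machine (last_was_consecutive flag, first_tuple_in_seq, growing accum_tuple, in-loop last-index flush) by a run-based scan that finds each maximal chain of linked tuples with an inner scan and then emits the flattened slice concatenation for that run in one shot.
import Mathlib
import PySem

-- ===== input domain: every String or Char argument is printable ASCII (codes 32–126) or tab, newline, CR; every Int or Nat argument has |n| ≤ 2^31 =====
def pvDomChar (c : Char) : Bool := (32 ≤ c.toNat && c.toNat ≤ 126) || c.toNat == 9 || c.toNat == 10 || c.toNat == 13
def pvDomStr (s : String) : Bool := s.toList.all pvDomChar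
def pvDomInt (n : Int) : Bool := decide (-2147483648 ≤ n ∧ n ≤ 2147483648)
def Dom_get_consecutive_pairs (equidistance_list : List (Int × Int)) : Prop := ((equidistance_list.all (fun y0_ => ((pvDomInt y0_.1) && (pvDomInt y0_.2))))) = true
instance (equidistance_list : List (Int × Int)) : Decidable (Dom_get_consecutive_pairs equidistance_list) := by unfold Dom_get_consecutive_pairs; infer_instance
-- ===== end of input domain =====

-- B replaces A's streaming flag/accumulator state machine by a run-based scan
-- (find each maximal chain of linked tuples, emit its flattened concatenation in
-- one shot); objective: alternative decomposition, same asymptotic cost.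

-- ===== PORT A =====
-- state: (dict, last_was_consecutive, first_tuple_in_seq, accum_tuple)
abbrev PVSt := PySem.Dict (Int × Int) (List Int) × Bool × (Int × Int) × List Int

def pvStepA (l : List (Int × Int)) (st : PVSt) (p : Int × (Int × Int)) : PVSt :=
  let d := st.1
  let last := st.2.1
  let first := st.2.2.1
  let accum := st.2.2.2
  let i := p.1
  let t := p.2
  let nxt := (PySem.List.pyGet? l (i + 1)).getD (0, 0)
  if t.2 = nxt.1 then
    let first' := if last then first else t
    let accum' := if last then accum ++ [nxt.1, nxt.2] else [t.1, t.2, nxt.1, nxt.2]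
    let d' := if i = (l.length : Int) - 2 then d.insert first' accum' else d
    (d', true, first', accum')
  else if last then
    (d.insert first accum, false, first, accum)
  else
    (d, false, first, accum)

def get_consecutive_pairs (equidistance_list : List (Int × Int)) : List (Int × Int × List Int) :=
  ((PySem.List.enumerate (PySem.List.slice equidistance_list none (some (-1))) 0).foldl
      (pvStepA equidistance_list)
      (PySem.Dict.empty, false, ((0 : Int), (0 : Int)), ([] : List Int))).1.items.map
    (fun q => (q.1.1, q.1.2, q.2))

-- ===== PORT B =====
def pvFlat (ts : List (Int × Int)) : List Int := ts.flatMap (fun t => [t.1, t.2])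

-- Source B's inner while: length of the maximal linked prefix
def pvRunLen : List (Int × Int) → Nat
  | a :: b :: rest => if a.2 = b.1 then 1 + pvRunLen (b :: rest) else 1
  | _ => 1

theorem pvRunLen_pos (l : List (Int × Int)) : 1 ≤ pvRunLen l := by
  match l with
  | [] => simp [pvRunLen]
  | [a] => simp [pvRunLen]
  | a :: b :: rest => unfold pvRunLen; split <;> omega

-- Source B's outer while loop
def pvLoopB (d : PySem.Dict (Int × Int) (List Int)) (rest : List (Int × Int)) :
    PySem.Dict (Int × Int) (List Int) :=
  if 2 ≤ rest.length then
    let run := pvRunLen rest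
    pvLoopB (if 1 < run then d.insert rest.headI (pvFlat (rest.take run)) else d) (rest.drop run)
  else d
termination_by rest.length
decreasing_by
  simp only [List.length_drop]
  have := pvRunLen_pos rest
  omega

def get_consecutive_pairs_alt (equidistance_list : List (Int × Int)) : List (Int × Int × List Int) :=
  (pvLoopB PySem.Dict.empty equidistance_list).items.map (fun q => (q.1.1, q.1.2, q.2))

-- ===== PRECONDITION & SPEC =====
def Spec_get_consecutive_pairs (equidistance_list : List (Int × Int)) (out : List (Int × Int × List Int)) : Prop := out = get_consecutive_pairs_alt equidistance_list
instance (equidistance_list : List (Int × Int)) (out : List (Int × Int × List Int)) : Decidable (Spec_get_consecutive_pairs equidistance_list out) := by unfold Spec_get_consecutive_pairs; infer_instance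

-- ===== CLAIM (what is proved, stated in full; the proofs are below) =====
def Claim_equal_get_consecutive_pairs : Prop := ∀ (equidistance_list : List (Int × Int)), Dom_get_consecutive_pairs equidistance_list → Spec_get_consecutive_pairs equidistance_list (get_consecutive_pairs equidistance_list)

-- ===== LEMMAS AND PROOFS =====

-- A's loop body, with the index-dependent quantities (next tuple, is-last-index)
-- made explicit arguments
def pvStepP (st : PVSt) (t nxt : Int × Int) (isLast : Bool) : PVSt :=
  let d := st.1
  let last := st.2.1
  let first := st.2.2.1
  let accum := st.2.2.2
  if t.2 = nxt.1 then
    let first' := if last then first else t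
    let accum' := if last then accum ++ [nxt.1, nxt.2] else [t.1, t.2, nxt.1, nxt.2]
    let d' := if isLast then d.insert first' accum' else d
    (d', true, first', accum')
  else if last then
    (d.insert first accum, false, first, accum)
  else
    (d, false, first, accum)

-- A's loop as a lookahead recursion over the list itself
def pvRecA (st : PVSt) : List (Int × Int) → PVSt
  | a :: b :: rest => pvRecA (pvStepP st a b rest.isEmpty) (b :: rest)
  | _ => st
termination_by l => l.length

theorem pvRecA_nil (st : PVSt) : pvRecA st [] = st := by rw [pvRecA]; simp

theorem pvRecA_single (st : PVSt) (x : Int × Int) : pvRecA st [x] = st := by rw [pvRecA]; simp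

theorem pvRecA_cons₂ (st : PVSt) (a b : Int × Int) (rest : List (Int × Int)) :
    pvRecA st (a :: b :: rest) = pvRecA (pvStepP st a b rest.isEmpty) (b :: rest) := by
  rw [pvRecA]

theorem pvStepP_false_link (d : PySem.Dict (Int × Int) (List Int)) (f t nxt : Int × Int)
    (a : List Int) (hlink : t.2 = nxt.1) (rest : List (Int × Int)) :
    pvStepP (d, false, f, a) t nxt rest.isEmpty
      = (if rest.isEmpty then d.insert t [t.1, t.2, nxt.1, nxt.2] else d,
         true, t, [t.1, t.2, nxt.1, nxt.2]) := by
  simp only [pvStepP]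
  rw [if_pos hlink]
  simp

theorem pvStepP_true_link (d : PySem.Dict (Int × Int) (List Int)) (first t nxt : Int × Int)
    (accum : List Int) (hlink : t.2 = nxt.1) (rest : List (Int × Int)) :
    pvStepP (d, true, first, accum) t nxt rest.isEmpty
      = (if rest.isEmpty then d.insert first (accum ++ [nxt.1, nxt.2]) else d,
         true, first, accum ++ [nxt.1, nxt.2]) := by
  simp only [pvStepP]
  rw [if_pos hlink]
  simp

theorem pvStepP_false_nolink (d : PySem.Dict (Int × Int) (List Int)) (f t nxt : Int × Int)
    (a : List Int) (hlink : ¬ t.2 = nxt.1) (isLast : Bool) :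
    pvStepP (d, false, f, a) t nxt isLast = (d, false, f, a) := by
  simp only [pvStepP]
  rw [if_neg hlink]
  simp

theorem pvStepP_true_nolink (d : PySem.Dict (Int × Int) (List Int)) (first t nxt : Int × Int)
    (accum : List Int) (hlink : ¬ t.2 = nxt.1) (isLast : Bool) :
    pvStepP (d, true, first, accum) t nxt isLast
      = (d.insert first accum, false, first, accum) := by
  simp only [pvStepP]
  rw [if_neg hlink]
  simp

theorem pvStepA_eq_stepP (l : List (Int × Int)) (k : Nat) (a b : Int × Int)
    (rest : List (Int × Int)) (st : PVSt)
    (hget : PySem.List.pyGet? l ((k : Int) + 1) = some b)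
    (hlen : l.length = k + 2 + rest.length) :
    pvStepA l st ((k : Int), a) = pvStepP st a b rest.isEmpty := by
  have hiff : (((k : Int)) = (l.length : Int) - 2) ↔ (rest.isEmpty = true) := by
    cases rest
    all_goals simp_all
    all_goals omega
  simp only [pvStepA, pvStepP, hget, Option.getD_some, hiff]

theorem pvFoldA_eq_recA (l : List (Int × Int)) (k : Nat) (st : PVSt) :
    (PySem.List.enumerate ((l.drop k).dropLast) (k : Int)).foldl (pvStepA l) st
      = pvRecA st (l.drop k) := by
  cases hm : l.drop k with
  | nil => simp [pvRecA_nil]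
  | cons a tl =>
    cases tl with
    | nil => simp [pvRecA_single]
    | cons b rest =>
      have hk : k < l.length := by
        by_contra h
        simp [List.drop_eq_nil_of_le (by omega : l.length ≤ k)] at hm
      have hdrop1 : l.drop (k + 1) = b :: rest := by
        rw [← List.tail_drop, hm]
        rfl
      have hlen : l.length = k + 2 + rest.length := by
        have h1 := congrArg List.length hm
        simp at h1
        omega
      have hget : PySem.List.pyGet? l ((k : Int) + 1) = some b := by
        have h0 : (l.drop (k + 1))[0]? = some b := by rw [hdrop1]; rfl
        rw [List.getElem?_drop] at h0
        have : PySem.List.pyGet? l (((k + 1 : Nat) : Int)) = some b := by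
          rw [PySem.List.pyGet?_natCast]
          simpa using h0
        simpa [Int.natCast_add] using this
      have hddl : (l.drop k).dropLast = a :: (l.drop (k + 1)).dropLast := by
        rw [hm, hdrop1]; rfl
      have IH := pvFoldA_eq_recA l (k + 1) (pvStepA l st ((k : Int), a))
      rw [hm, hddl, hdrop1] at *
      rw [PySem.List.enumerate_cons, List.foldl_cons]
      have hcast : ((k : Int) + 1) = (((k + 1 : Nat)) : Int) := by push_cast; ring
      rw [hcast] at *
      rw [IH, pvStepA_eq_stepP l k a b rest st hget hlen, pvRecA_cons₂]
termination_by l.length - k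
decreasing_by
  have : k < l.length := by
    by_contra h
    simp [List.drop_eq_nil_of_le (by omega : l.length ≤ k)] at hm
  omega

theorem pvLoopB_short (d : PySem.Dict (Int × Int) (List Int)) (l : List (Int × Int))
    (h : l.length < 2) : pvLoopB d l = d := by
  rw [pvLoopB]
  simp [Nat.not_le.mpr h]

theorem pvLoopB_cons₂ (d : PySem.Dict (Int × Int) (List Int)) (a b : Int × Int)
    (rest : List (Int × Int)) :
    pvLoopB d (a :: b :: rest)
      = pvLoopB
          (if 1 < pvRunLen (a :: b :: rest) then
            d.insert a (pvFlat ((a :: b :: rest).take (pvRunLen (a :: b :: rest))))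
          else d)
          ((a :: b :: rest).drop (pvRunLen (a :: b :: rest))) := by
  rw [pvLoopB]
  simp

-- main invariant: A's lookahead recursion computes B's run loop.
-- part 1 (flag down): pvRecA (d,false,·,·) l = pvLoopB d l
-- part 2 (flag up, mid-run with pending (first, accum), run continuing at b):
--   the eventual insert is first ↦ accum ++ the remaining tuples of the run.
theorem pvMain (n : Nat) :
    ∀ l : List (Int × Int), l.length ≤ n →
      ((∀ (d : PySem.Dict (Int × Int) (List Int)) (f : Int × Int) (a : List Int),
          (pvRecA (d, false, f, a) l).1 = pvLoopB d l) ∧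
       (∀ (b : Int × Int) (d : PySem.Dict (Int × Int) (List Int)) (first : Int × Int)
          (accum : List Int), l ≠ [] →
          (pvRecA (d, true, first, accum) (b :: l)).1
            = pvLoopB (d.insert first (accum ++ pvFlat (l.take (pvRunLen (b :: l) - 1))))
                ((b :: l).drop (pvRunLen (b :: l))))) := by
  induction n with
  | zero =>
    intro l hl
    have : l = [] := List.eq_nil_of_length_eq_zero (by omega)
    subst this
    constructor
    · intro d f a; simp [pvRecA_nil, pvLoopB_short]
    · intro b d first accum h; exact absurd rfl h
  | succ n IH =>
    intro l hl
    have part1 : ∀ (d : PySem.Dict (Int × Int) (List Int)) (f : Int × Int) (a : List Int),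
        (pvRecA (d, false, f, a) l).1 = pvLoopB d l := by
      intro d f a
      match l, hl with
      | [], _ => simp [pvRecA_nil, pvLoopB_short]
      | [x], _ => simp [pvRecA_single, pvLoopB_short]
      | a' :: b :: rest, hl =>
        rw [pvRecA_cons₂]
        by_cases hlink : a'.2 = b.1
        · rw [pvStepP_false_link d f a' b a hlink rest]
          have hrun : pvRunLen (a' :: b :: rest) = 1 + pvRunLen (b :: rest) := by
            rw [pvRunLen, if_pos hlink]
          cases rest with
          | nil =>
            simp only [List.isEmpty_nil, if_true]
            rw [pvRecA_single, pvLoopB_cons₂]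
            have h2 : pvRunLen [a', b] = 2 := by
              rw [hrun]; rfl
            rw [h2]
            simp [pvFlat, pvLoopB_short]
          | cons c rs =>
            simp only [List.isEmpty_cons, if_false, Bool.false_eq_true]
            have h2 := (IH (c :: rs) (by simp at hl ⊢; omega)).2 b d a'
              [a'.1, a'.2, b.1, b.2] (by simp)
            rw [h2, pvLoopB_cons₂, hrun]
            have hpos := pvRunLen_pos (b :: c :: rs)
            have htake : (a' :: b :: c :: rs).take (1 + pvRunLen (b :: c :: rs))
                = a' :: (b :: c :: rs).take (pvRunLen (b :: c :: rs)) := by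
              rw [Nat.add_comm, List.take_succ_cons]
            have htake2 : (b :: c :: rs).take (pvRunLen (b :: c :: rs))
                = b :: (c :: rs).take (pvRunLen (b :: c :: rs) - 1) := by
              rcases Nat.exists_eq_add_of_le hpos with ⟨m, hm⟩
              rw [hm, Nat.add_comm, List.take_succ_cons]
              simp
            have hdrop : (a' :: b :: c :: rs).drop (1 + pvRunLen (b :: c :: rs))
                = (b :: c :: rs).drop (pvRunLen (b :: c :: rs)) := by
              rw [Nat.add_comm, List.drop_succ_cons]
            rw [if_pos (by omega), htake, htake2, hdrop]
            simp [pvFlat]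
        · rw [pvStepP_false_nolink d f a' b a hlink]
          have h1 := (IH (b :: rest) (by simp at hl ⊢; omega)).1 d f a
          rw [h1, pvLoopB_cons₂]
          have hrun : pvRunLen (a' :: b :: rest) = 1 := by
            rw [pvRunLen, if_neg hlink]
          rw [hrun]
          simp
    refine ⟨part1, ?_⟩
    intro b d first accum hne
    cases l with
    | nil => exact absurd rfl hne
    | cons c rest =>
      rw [pvRecA_cons₂]
      by_cases hlink : b.2 = c.1
      · rw [pvStepP_true_link d first b c accum hlink rest]
        have hrun : pvRunLen (b :: c :: rest) = 1 + pvRunLen (c :: rest) := by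
          rw [pvRunLen, if_pos hlink]
        cases rest with
        | nil =>
          simp only [List.isEmpty_nil, if_true]
          rw [pvRecA_single]
          have h2 : pvRunLen (b :: [c]) = 2 := by rw [hrun]; rfl
          rw [h2]
          simp [pvFlat, pvLoopB_short]
        | cons e rs =>
          simp only [List.isEmpty_cons, if_false, Bool.false_eq_true]
          have h2 := (IH (e :: rs) (by simp at hl ⊢; omega)).2 c d first
            (accum ++ [c.1, c.2]) (by simp)
          rw [h2]
          have hpos := pvRunLen_pos (c :: e :: rs)
          rw [hrun]
          have htake : (c :: e :: rs).take (1 + pvRunLen (c :: e :: rs) - 1)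
              = c :: (e :: rs).take (pvRunLen (c :: e :: rs) - 1) := by
            rcases Nat.exists_eq_add_of_le hpos with ⟨m, hm⟩
            rw [hm]
            have : 1 + (1 + m) - 1 = m + 1 := by omega
            rw [this, List.take_succ_cons]
            simp
          have hdrop : (b :: c :: e :: rs).drop (1 + pvRunLen (c :: e :: rs))
              = (c :: e :: rs).drop (pvRunLen (c :: e :: rs)) := by
            rw [Nat.add_comm, List.drop_succ_cons]
          rw [htake, hdrop]
          simp [pvFlat]
      · rw [pvStepP_true_nolink d first b c accum hlink]
        have hrun : pvRunLen (b :: c :: rest) = 1 := by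
          rw [pvRunLen, if_neg hlink]
        rw [part1 (d.insert first accum) first accum, hrun]
        simp [pvFlat]

-- ===== VERDICT (by name: the statement is the Claim_ definition above) =====
theorem get_consecutive_pairs_spec : Claim_equal_get_consecutive_pairs := by
  intro l _
  unfold Spec_get_consecutive_pairs get_consecutive_pairs get_consecutive_pairs_alt
  rw [PySem.List.slice_to_neg_one l]
  have h2 := pvFoldA_eq_recA l 0 (PySem.Dict.empty, false, ((0 : Int), (0 : Int)), ([] : List Int))
  simp only [List.drop_zero, Nat.cast_zero] at h2
  rw [h2, (pvMain l.length l le_rfl).1 PySem.Dict.empty ((0 : Int), (0 : Int)) []]
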